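-- pv_equiv track=rewrite | github.com/JovanXin/CP | most_freq_num_intervals.py | solve
-- ===== SOURCE A (Python) =====
-- def solve(intervals):
--     nums = {}
--     most_freq_num = 0
--     current_freq = 0
--
--     for interval in intervals:
--         for num in range(interval[0], interval[1] + 1):
--             if num in nums.keys():
--                 nums[num] += 1
--             else:
--                 nums[num] = 1
--
--     for num, freq in nums.items():
--         if freq > current_freq:
--             most_freq_num = num
--             current_freq = freq
--         elif freq == current_freq and num < most_freq_num:
--             most_freq_num = num
--
--     return most_freq_num
-- ===== SOURCE B (Python) =====
-- def solve(intervals):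
--     # The smallest max-coverage point is always some interval start, so only
--     # scan candidate start points instead of expanding every integer in range.
--     best_num = 0
--     best_freq = 0
--     for a in sorted({iv[0] for iv in intervals if iv[0] <= iv[1]}):
--         c = sum(1 for iv in intervals if iv[0] <= a <= iv[1])
--         if c > best_freq:
--             best_freq = c
--             best_num = a
--     return best_num
-- ===== Notes on version B (the rewrite author's own statement) =====
-- stated objective: faster
-- what changed: Instead of materialising a counter over every integer of every interval and scanning it, B uses the fact that the smallest point of maximum coverage is always an interval start: it scans only the sorted distinct start points and counts covering intervals per candidate, so the cost no longer depends on the width of the intervals.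
import Mathlib
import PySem

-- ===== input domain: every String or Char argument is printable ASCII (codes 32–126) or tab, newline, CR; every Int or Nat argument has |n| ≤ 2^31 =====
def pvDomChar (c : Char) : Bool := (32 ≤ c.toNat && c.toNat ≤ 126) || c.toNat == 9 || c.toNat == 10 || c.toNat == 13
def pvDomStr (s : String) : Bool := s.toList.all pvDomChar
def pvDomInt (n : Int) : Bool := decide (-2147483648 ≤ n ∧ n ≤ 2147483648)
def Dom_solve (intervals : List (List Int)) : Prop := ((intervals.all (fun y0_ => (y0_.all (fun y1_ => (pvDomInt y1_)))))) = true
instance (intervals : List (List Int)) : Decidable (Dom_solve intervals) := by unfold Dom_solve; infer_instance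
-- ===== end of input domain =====

-- B replaces A's per-integer counter (cost = total interval width) by a scan of the
-- sorted distinct interval start points only: faster, same return value.

-- ===== PORT A =====
-- A-side helpers: the two loop bodies of A as named steps.
def aCountStep (d : PySem.Dict Int Int) (num : Int) : PySem.Dict Int Int :=
  if d.contains num then d.insert num (d.getD num 0 + 1) else d.insert num 1

def aBestStep (s : Int × Int) (p : Int × Int) : Int × Int :=
  if p.2 > s.2 then (p.1, p.2)
  else if p.2 = s.2 ∧ p.1 < s.1 then (p.1, s.2)
  else s

def solve (intervals : List (List Int)) : Int :=
  let nums : PySem.Dict Int Int :=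
    intervals.foldl (fun d interval =>
      (PySem.List.pyRange (PySem.List.pyGetD interval 0 0)
        (PySem.List.pyGetD interval 1 0 + 1) 1).foldl aCountStep d) PySem.Dict.empty
  (nums.items.foldl aBestStep (0, 0)).1

-- ===== PORT B =====
-- B-side helpers: coverage count of a candidate point, and B's loop body.
def bCov (intervals : List (List Int)) (a : Int) : Int :=
  ((intervals.filter (fun iv =>
      decide (PySem.List.pyGetD iv 0 0 ≤ a) && decide (a ≤ PySem.List.pyGetD iv 1 0))).length : Int)

def bBestStep (intervals : List (List Int)) (s : Int × Int) (a : Int) : Int × Int :=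
  let c := bCov intervals a
  if c > s.2 then (a, c) else s

def solve_alt (intervals : List (List Int)) : Int :=
  let starts : List Int :=
    PySem.List.sorted
      (PySem.Set.ofList ((intervals.filter (fun iv =>
          decide (PySem.List.pyGetD iv 0 0 ≤ PySem.List.pyGetD iv 1 0))).map
        (fun iv => PySem.List.pyGetD iv 0 0)))
      (fun x => x) false
  (starts.foldl (bBestStep intervals) (0, 0)).1

-- ===== PRECONDITION & SPEC =====
-- Pre_: Python A raises IndexError on interval[0]/interval[1] when some interval has
-- fewer than two elements; exactly those inputs are excluded.
def Pre_solve (intervals : List (List Int)) : Prop := ∀ iv ∈ intervals, 2 ≤ iv.length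
instance (intervals : List (List Int)) : Decidable (Pre_solve intervals) := by
  unfold Pre_solve; infer_instance

def pvWitness_solve : List (List Int) := [[1, 3], [2, 5]]

def Spec_solve (intervals : List (List Int)) (out : Int) : Prop := out = solve_alt intervals
instance (intervals : List (List Int)) (out : Int) : Decidable (Spec_solve intervals out) := by
  unfold Spec_solve; infer_instance

-- ===== CLAIM (what is proved, stated in full; the proofs are below) =====
def Claim_equal_solve : Prop := ∀ (intervals : List (List Int)), Dom_solve intervals → Pre_solve intervals → Spec_solve intervals (solve intervals)

-- ===== LEMMAS AND PROOFS =====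

-- Abbreviations for proofs.
def pvLo (iv : List Int) : Int := PySem.List.pyGetD iv 0 0
def pvHi (iv : List Int) : Int := PySem.List.pyGetD iv 1 0

-- the flattened list of all covered integers, with multiplicity
def pvL (intervals : List (List Int)) : List Int :=
  intervals.flatMap (fun iv => PySem.List.pyRange (pvLo iv) (pvHi iv + 1) 1)

-- coverage as a Nat
def pvCov (intervals : List (List Int)) (x : Int) : Nat :=
  (intervals.filter (fun iv => decide (pvLo iv ≤ x) && decide (x ≤ pvHi iv))).length

lemma count_range_ind (iv : List Int) (x : Int) :
    (PySem.List.pyRange (pvLo iv) (pvHi iv + 1) 1).count x =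
      if pvLo iv ≤ x ∧ x ≤ pvHi iv then 1 else 0 := by
  by_cases h : pvLo iv ≤ x ∧ x ≤ pvHi iv
  · rw [if_pos h]
    exact List.count_eq_one_of_mem (PySem.List.nodup_pyRange_one _ _)
      ((PySem.List.mem_pyRange_one).mpr ⟨h.1, by omega⟩)
  · rw [if_neg h, List.count_eq_zero_of_not_mem]
    intro hm
    rcases (PySem.List.mem_pyRange_one).mp hm with ⟨h1, h2⟩
    exact h ⟨h1, by omega⟩

lemma count_pvL (intervals : List (List Int)) (x : Int) :
    (pvL intervals).count x = pvCov intervals x := by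
  induction intervals with
  | nil => rfl
  | cons iv t ih =>
    simp only [pvL, List.flatMap_cons, List.count_append, pvCov, List.filter_cons] at *
    rw [count_range_ind]
    by_cases h : pvLo iv ≤ x ∧ x ≤ pvHi iv
    · simp [h, ih]; omega
    · have : (decide (pvLo iv ≤ x) && decide (x ≤ pvHi iv)) = false := by
        simp only [Bool.and_eq_false_iff, decide_eq_false_iff_not]; tauto
      simp [h, this, ih]

lemma mem_pvL (intervals : List (List Int)) (x : Int) :
    x ∈ pvL intervals ↔ 0 < pvCov intervals x := by
  simp only [pvL, List.mem_flatMap, PySem.List.mem_pyRange_one, pvCov,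
    ← List.countP_eq_length_filter, List.countP_pos_iff, Bool.and_eq_true, decide_eq_true_eq]
  constructor
  · rintro ⟨iv, hiv, h1, h2⟩; exact ⟨iv, hiv, h1, by omega⟩
  · rintro ⟨iv, hiv, h1, h2⟩; exact ⟨iv, hiv, h1, by omega⟩

-- "m is the smallest key attaining the maximal value f of the pair list ps" (0,0 if empty)
def pvIsBest (ps : List (Int × Int)) (m f : Int) : Prop :=
  (ps = [] ∧ m = 0 ∧ f = 0) ∨
  ((m, f) ∈ ps ∧ ∀ p ∈ ps, p.2 ≤ f ∧ (p.2 = f → m ≤ p.1))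

lemma foldA_isBest (ps : List (Int × Int)) (h1 : ∀ p ∈ ps, 1 ≤ p.2) :
    pvIsBest ps (ps.foldl aBestStep (0, 0)).1 (ps.foldl aBestStep (0, 0)).2 := by
  induction ps using List.reverseRecOn with
  | nil => left; exact ⟨rfl, rfl, rfl⟩
  | append_singleton t p ih =>
    have hp : 1 ≤ p.2 := h1 p (by simp)
    rw [List.foldl_append, List.foldl_cons, List.foldl_nil]
    rcases ih (fun q hq => h1 q (List.mem_append_left _ hq)) with ⟨ht, _, _⟩ | ⟨hmem, hall⟩
    · subst ht
      simp only [List.foldl_nil, List.nil_append]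
      unfold aBestStep
      rw [if_pos (by simpa using hp : p.2 > ((0:Int),(0:Int)).2)]
      right
      refine ⟨by simp, ?_⟩
      rintro q hq
      simp only [List.mem_singleton] at hq
      subst hq; exact ⟨le_refl _, fun _ => le_refl _⟩
    · set s := t.foldl aBestStep (0, 0) with hs
      unfold aBestStep
      split_ifs with hgt heq
      · right
        refine ⟨by simp, ?_⟩
        rintro q hq
        rcases List.mem_append.mp hq with hq | hq
        · have := (hall q hq).1
          exact ⟨by omega, fun h => by omega⟩
        · simp only [List.mem_singleton] at hq; subst hq
          exact ⟨le_refl _, fun _ => le_refl _⟩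
      · right
        have hpe : ((p.1, s.2) : Int × Int) = p := by rw [← heq.1]
        refine ⟨by rw [hpe]; simp, ?_⟩
        rintro q hq
        rcases List.mem_append.mp hq with hq | hq
        · refine ⟨(hall q hq).1, fun h => ?_⟩
          have := (hall q hq).2 (by omega)
          omega
        · simp only [List.mem_singleton] at hq; subst hq
          exact ⟨by omega, fun _ => le_refl _⟩
      · right
        refine ⟨List.mem_append_left _ hmem, ?_⟩
        rintro q hq
        rcases List.mem_append.mp hq with hq | hq
        · exact hall q hq
        · simp only [List.mem_singleton] at hq; subst hq
          exact ⟨by omega, fun h => by omega⟩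

lemma foldB_isBest (intervals : List (List Int)) (S : List Int)
    (hS : S.Pairwise (· < ·)) (h1 : ∀ a ∈ S, 1 ≤ bCov intervals a) :
    pvIsBest (S.map (fun a => (a, bCov intervals a)))
      (S.foldl (bBestStep intervals) (0, 0)).1 (S.foldl (bBestStep intervals) (0, 0)).2 := by
  induction S using List.reverseRecOn with
  | nil => left; exact ⟨rfl, rfl, rfl⟩
  | append_singleton t a ih =>
    have hc : 1 ≤ bCov intervals a := h1 a (by simp)
    have hlt : ∀ x ∈ t, x < a := by
      have := (List.pairwise_append.mp hS).2.2
      intro x hx; exact this x hx a (by simp)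
    rw [List.foldl_append, List.foldl_cons, List.foldl_nil, List.map_append, List.map_cons,
      List.map_nil]
    rcases ih (List.pairwise_append.mp hS).1 (fun q hq => h1 q (List.mem_append_left _ hq))
      with ⟨ht, _, _⟩ | ⟨hmem, hall⟩
    · rcases List.map_eq_nil_iff.mp ht with rfl
      simp only [List.foldl_nil, List.nil_append, List.map_nil]
      unfold bBestStep
      rw [if_pos (by simpa using hc : bCov intervals a > ((0:Int),(0:Int)).2)]
      right
      refine ⟨by simp, ?_⟩
      rintro q hq
      simp only [List.mem_singleton] at hq
      subst hq; exact ⟨le_refl _, fun _ => le_refl _⟩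
    · set s := t.foldl (bBestStep intervals) (0, 0) with hs
      have hmemt : s.1 ∈ t := by
        rcases List.mem_map.mp hmem with ⟨x, hx, hxe⟩
        have : x = s.1 := congrArg Prod.fst hxe
        exact this ▸ hx
      unfold bBestStep
      simp only []
      split_ifs with hgt
      · right
        refine ⟨by simp, ?_⟩
        rintro q hq
        rcases List.mem_append.mp hq with hq | hq
        · have := (hall q hq).1
          exact ⟨by omega, fun h => by omega⟩
        · simp only [List.mem_singleton] at hq; subst hq
          exact ⟨le_refl _, fun _ => le_refl _⟩
      · right
        refine ⟨List.mem_append_left _ hmem, ?_⟩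
        rintro q hq
        rcases List.mem_append.mp hq with hq | hq
        · exact hall q hq
        · simp only [List.mem_singleton] at hq; subst hq
          refine ⟨by omega, fun h => ?_⟩
          have := hlt s.1 hmemt
          omega



-- B's candidate list: the sorted distinct start points of nonempty intervals
def pvS (intervals : List (List Int)) : List Int :=
  PySem.List.sorted
    (PySem.Set.ofList ((intervals.filter (fun iv =>
        decide (PySem.List.pyGetD iv 0 0 ≤ PySem.List.pyGetD iv 1 0))).map
      (fun iv => PySem.List.pyGetD iv 0 0)))
    (fun x => x) false

-- A's items list after the counting loops
def pvPsA (intervals : List (List Int)) : List (Int × Int) :=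
  (PySem.Set.ofList (pvL intervals)).map (fun k => (k, ((pvL intervals).count k : Int)))

lemma bCov_eq (intervals : List (List Int)) (x : Int) :
    bCov intervals x = (pvCov intervals x : Int) := rfl

lemma mem_pvS (intervals : List (List Int)) (a : Int) :
    a ∈ pvS intervals ↔ ∃ iv ∈ intervals, pvLo iv ≤ pvHi iv ∧ pvLo iv = a := by
  simp [pvS, PySem.List.mem_sorted, PySem.Set.mem_ofList, List.mem_map, List.mem_filter,
    pvLo, pvHi]
  tauto

lemma cov_exists (intervals : List (List Int)) (x : Int) (h : 0 < pvCov intervals x) :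
    ∃ iv ∈ intervals, pvLo iv ≤ x ∧ x ≤ pvHi iv := by
  unfold pvCov at h
  rw [← List.countP_eq_length_filter, List.countP_pos_iff] at h
  rcases h with ⟨iv, hiv, hp⟩
  simp only [Bool.and_eq_true, decide_eq_true_eq] at hp
  exact ⟨iv, hiv, hp⟩

lemma cov_pos_of_mem_pvS (intervals : List (List Int)) (a : Int) (h : a ∈ pvS intervals) :
    0 < pvCov intervals a := by
  rcases (mem_pvS intervals a).mp h with ⟨iv, hiv, hle, hla⟩
  unfold pvCov
  rw [← List.countP_eq_length_filter, List.countP_pos_iff]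
  exact ⟨iv, hiv, by simp only [Bool.and_eq_true, decide_eq_true_eq]; omega⟩

lemma pvS_mem_of_cov (intervals : List (List Int)) (x : Int) (h : 0 < pvCov intervals x) :
    ∃ a, a ∈ pvS intervals := by
  rcases cov_exists intervals x h with ⟨iv, hiv, h1, h2⟩
  exact ⟨pvLo iv, (mem_pvS intervals _).mpr ⟨iv, hiv, by omega, rfl⟩⟩

lemma psA_pair (intervals : List (List Int)) (m f : Int) (h : (m, f) ∈ pvPsA intervals) :
    0 < pvCov intervals m ∧ f = (pvCov intervals m : Int) := by
  rcases List.mem_map.mp h with ⟨k, hk, hke⟩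
  simp only [Prod.mk.injEq] at hke
  obtain ⟨rfl, rfl⟩ := hke
  have hmem : k ∈ pvL intervals := (PySem.Set.mem_ofList _ _).mp hk
  exact ⟨(mem_pvL intervals k).mp hmem, by rw [count_pvL]⟩

lemma psA_mem_of_cov (intervals : List (List Int)) (x : Int) (h : 0 < pvCov intervals x) :
    (x, (pvCov intervals x : Int)) ∈ pvPsA intervals := by
  have hx : x ∈ pvL intervals := (mem_pvL intervals x).mpr h
  exact List.mem_map.mpr ⟨x, (PySem.Set.mem_ofList _ _).mpr hx, by rw [count_pvL]⟩

-- the smallest point of maximal coverage is a start point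
lemma argmax_mem_pvS (intervals : List (List Int)) (m f : Int)
    (hmf : 0 < pvCov intervals m ∧ f = (pvCov intervals m : Int))
    (hall : ∀ x, 0 < pvCov intervals x → (pvCov intervals x : Int) ≤ f ∧
      ((pvCov intervals x : Int) = f → m ≤ x)) :
    m ∈ pvS intervals := by
  by_contra hns
  have hmono : pvCov intervals m ≤ pvCov intervals (m - 1) := by
    unfold pvCov
    rw [← List.countP_eq_length_filter, ← List.countP_eq_length_filter]
    apply List.countP_mono_left
    intro iv hiv hp
    simp only [Bool.and_eq_true, decide_eq_true_eq] at hp ⊢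
    have hne : pvLo iv ≠ m := by
      intro he
      exact hns ((mem_pvS intervals m).mpr ⟨iv, hiv, by omega, he⟩)
    omega
  have hpos : 0 < pvCov intervals (m - 1) := by omega
  have h1 := hall (m - 1) hpos
  have h2 := (hall m hmf.1).1
  have : (pvCov intervals (m - 1) : Int) = f := by omega
  have := h1.2 this
  omega

-- A's dict is the counter of the flattened covered list
lemma solve_eq_foldA (intervals : List (List Int)) :
    solve intervals = ((pvPsA intervals).foldl aBestStep (0, 0)).1 := by
  have h1 : intervals.foldl (fun d interval =>
      (PySem.List.pyRange (PySem.List.pyGetD interval 0 0)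
        (PySem.List.pyGetD interval 1 0 + 1) 1).foldl aCountStep d) PySem.Dict.empty
      = (pvL intervals).foldl aCountStep PySem.Dict.empty := by
    rw [pvL, List.foldl_flatMap]
    rfl
  have h2 : (pvL intervals).foldl aCountStep PySem.Dict.empty
      = PySem.Dict.counter (pvL intervals) := by
    rw [← PySem.Dict.foldl_insert_getD_add_one_eq_counter]
    apply PySem.List.foldl_congr_mem
    intro acc x _
    unfold aCountStep
    by_cases h : acc.contains x = true
    · rw [if_pos h]
    · rw [if_neg h]
      have h0 : acc.getD x 0 = 0 :=
        PySem.Dict.getD_of_not_contains acc 0 (by simpa using h)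
      rw [h0]
      norm_num
  have hshow : solve intervals = ((intervals.foldl (fun d interval =>
      (PySem.List.pyRange (PySem.List.pyGetD interval 0 0)
        (PySem.List.pyGetD interval 1 0 + 1) 1).foldl aCountStep d)
      PySem.Dict.empty).items.foldl aBestStep (0, 0)).1 := rfl
  rw [hshow, h1, h2, PySem.Dict.items_counter]
  rfl

lemma solve_alt_eq_foldB (intervals : List (List Int)) :
    solve_alt intervals = ((pvS intervals).foldl (bBestStep intervals) (0, 0)).1 := rfl

theorem solve_eq (intervals : List (List Int)) : solve intervals = solve_alt intervals := by
  rw [solve_eq_foldA, solve_alt_eq_foldB]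
  have h1A : ∀ p ∈ pvPsA intervals, 1 ≤ p.2 := by
    rintro ⟨m, f⟩ hp
    have := psA_pair intervals m f hp
    simp only []
    omega
  have hS : (pvS intervals).Pairwise (· < ·) := PySem.List.sorted_ofList_pairwise_lt _
  have h1B : ∀ a ∈ pvS intervals, 1 ≤ bCov intervals a := by
    intro a ha
    rw [bCov_eq]
    have := cov_pos_of_mem_pvS intervals a ha
    omega
  have hA := foldA_isBest (pvPsA intervals) h1A
  have hB := foldB_isBest intervals (pvS intervals) hS h1B
  set rA := (pvPsA intervals).foldl aBestStep (0, 0) with hrA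
  set rB := (pvS intervals).foldl (bBestStep intervals) (0, 0) with hrB
  rcases hA with ⟨hAe, hA1, _⟩ | ⟨hAmem, hAall⟩
  · -- A's list empty: no covered point, hence no start point, B's list empty too
    rcases hB with ⟨hBe, hB1, _⟩ | ⟨hBmem, _⟩
    · rw [hA1, hB1]
    · exfalso
      rcases List.mem_map.mp hBmem with ⟨a, ha, hae⟩
      have hc := cov_pos_of_mem_pvS intervals a ha
      have : a ∈ pvL intervals := (mem_pvL intervals a).mpr hc
      have : (a, ((pvL intervals).count a : Int)) ∈ pvPsA intervals :=
        List.mem_map.mpr ⟨a, (PySem.Set.mem_ofList _ _).mpr this, by rw [count_pvL]⟩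
      rw [hAe] at this
      exact absurd this (List.not_mem_nil)
  · rcases hB with ⟨hBe, _, _⟩ | ⟨hBmem, hBall⟩
    · exfalso
      have := psA_pair intervals rA.1 rA.2 hAmem
      rcases pvS_mem_of_cov intervals rA.1 this.1 with ⟨a, ha⟩
      rw [List.map_eq_nil_iff.mp hBe] at ha
      exact absurd ha (List.not_mem_nil)
    · -- both nonempty: the two minima of the maximal-coverage points coincide
      have hApair := psA_pair intervals rA.1 rA.2 hAmem
      have hAcov : ∀ x, 0 < pvCov intervals x → (pvCov intervals x : Int) ≤ rA.2 ∧
          ((pvCov intervals x : Int) = rA.2 → rA.1 ≤ x) := by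
        intro x hx
        have := hAall (x, (pvCov intervals x : Int)) (psA_mem_of_cov intervals x hx)
        simpa using this
      have hBpair : rB.1 ∈ pvS intervals ∧ rB.2 = (pvCov intervals rB.1 : Int) := by
        rcases List.mem_map.mp hBmem with ⟨a, ha, hae⟩
        have h1 : a = rB.1 := congrArg Prod.fst hae
        have h2 : bCov intervals a = rB.2 := congrArg Prod.snd hae
        subst h1
        exact ⟨ha, by rw [← h2, bCov_eq]⟩
      have hBcov : ∀ a ∈ pvS intervals, (pvCov intervals a : Int) ≤ rB.2 ∧
          ((pvCov intervals a : Int) = rB.2 → rB.1 ≤ a) := by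
        intro a ha
        have := hBall (a, bCov intervals a) (List.mem_map.mpr ⟨a, ha, rfl⟩)
        simpa [bCov_eq] using this
      have hmS : rA.1 ∈ pvS intervals := argmax_mem_pvS intervals rA.1 rA.2 hApair hAcov
      have hBcovA := hBcov rA.1 hmS
      have hcovB : 0 < pvCov intervals rB.1 := cov_pos_of_mem_pvS intervals rB.1 hBpair.1
      have hAcovB := hAcov rB.1 hcovB
      -- rA.2 = rB.2
      have hfeq : rA.2 = rB.2 := by
        have := hApair.2
        have := hBpair.2
        omega
      have h1 : rA.1 ≤ rB.1 := hAcovB.2 (by omega)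
      have h2 : rB.1 ≤ rA.1 := hBcovA.2 (by omega)
      omega

-- ===== VERDICT (by name: the statement is the Claim_ definition above) =====
theorem solve_spec : Claim_equal_solve := by
  intro intervals _ _
  unfold Spec_solve
  exact solve_eq intervals
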